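-- pv_equiv track=rewrite | github.com/hanc00l/jscat | lib/payload.py | __shellcode_b64
-- ===== SOURCE A (Python) =====
-- def __shellcode_b64(text):
--     index = 0
--     ret = '"'
--     for c in text:
--         ret += str(c)
--         index += 1
--         if index % 100 == 0:
--             ret += '"+\r\n"'
--
--     ret += '"'
--     return ret
-- ===== SOURCE B (Python) =====
-- def __shellcode_b64(text):
--     parts = [str(c) for c in text]
--     blocks = []
--     for i in range(0, len(parts), 100):
--         blocks.append(''.join(parts[i:i+100]))
--         if i + 100 <= len(parts):
--             blocks.append('"+\r\n"')
--     return '"' + ''.join(blocks) + '"'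
-- ===== Notes on version B (the rewrite author's own statement) =====
-- stated objective: simpler
-- what changed: Replaces the per-character running-counter/modulo string accumulation with a strided chunk traversal: slice 100-element blocks, join each, and append the separator exactly when the slice is full.
import Mathlib
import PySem

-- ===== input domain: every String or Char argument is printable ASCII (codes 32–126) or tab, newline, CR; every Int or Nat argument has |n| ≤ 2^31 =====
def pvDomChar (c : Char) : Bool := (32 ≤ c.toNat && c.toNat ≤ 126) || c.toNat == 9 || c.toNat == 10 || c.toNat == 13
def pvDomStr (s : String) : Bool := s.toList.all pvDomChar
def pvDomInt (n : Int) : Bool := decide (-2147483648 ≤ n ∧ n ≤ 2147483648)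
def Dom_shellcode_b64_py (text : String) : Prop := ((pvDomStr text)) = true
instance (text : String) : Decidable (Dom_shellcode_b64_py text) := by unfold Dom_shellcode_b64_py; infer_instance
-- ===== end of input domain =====

-- B replaces A's per-character counter/modulo accumulation by a strided traversal over
-- 100-character slices (objective: simpler); both are total and agree on every string.

-- ===== PORT A =====
-- the body of A's for-loop: append the char, bump the counter, add the separator at each multiple of 100
def pvStepA (st : Nat × String) (c : Char) : Nat × String :=
  let ret := st.2 ++ String.ofList [c]
  let index := st.1 + 1
  if index % 100 = 0 then (index, ret ++ "\"+\r\n\"") else (index, ret)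

def shellcode_b64_py (text : String) : String :=
  (text.toList.foldl pvStepA (0, "\"")).2 ++ "\""

-- ===== PORT B =====
-- the strided loop 'for i in range(0, len(parts), 100)' of Source B, as recursion on i with step 100
def pvChunksB (parts : List Char) (i : Nat) : String :=
  if h : i < parts.length then
    String.ofList (PySem.List.slice parts (some (i : Int)) (some ((i : Int) + 100)))
      ++ (if i + 100 ≤ parts.length then "\"+\r\n\"" else "")
      ++ pvChunksB parts (i + 100)
  else ""
termination_by parts.length - i
decreasing_by omega

def shellcode_b64_py_alt (text : String) : String :=
  "\"" ++ pvChunksB text.toList 0 ++ "\""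

-- ===== PRECONDITION & SPEC =====
def Spec_shellcode_b64_py (text : String) (out : String) : Prop := out = shellcode_b64_py_alt text
instance (text : String) (out : String) : Decidable (Spec_shellcode_b64_py text out) := by unfold Spec_shellcode_b64_py; infer_instance

-- ===== CLAIM (what is proved, stated in full; the proofs are below) =====
def Claim_equal_shellcode_b64_py : Prop := ∀ (text : String), Dom_shellcode_b64_py text → Spec_shellcode_b64_py text (shellcode_b64_py text)

-- ===== LEMMAS AND PROOFS =====

-- canonical chunked rendering both ports are reduced to
def pvRender (l : List Char) : String :=
  if _h : l = [] then ""
  else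
    String.ofList (l.take 100) ++ (if 100 ≤ l.length then "\"+\r\n\"" else "")
      ++ pvRender (l.drop 100)
termination_by l.length
decreasing_by
  have h0 : 0 < l.length := List.length_pos_of_ne_nil ‹¬ l = []›
  simp
  omega

lemma pvRender_eq (l : List Char) :
    pvRender l = if l = [] then ""
      else String.ofList (l.take 100) ++ (if 100 ≤ l.length then "\"+\r\n\"" else "")
        ++ pvRender (l.drop 100) := by
  conv_lhs => rw [pvRender]
  by_cases h : l = []
  · rw [dif_pos h, if_pos h]
  · rw [dif_neg h, if_neg h]

lemma pvStepA_shift (i : Nat) (s : String) (c : Char) :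
    pvStepA (i + 100, s) c = ((pvStepA (i, s) c).1 + 100, (pvStepA (i, s) c).2) := by
  have h : (i + 100 + 1) % 100 = (i + 1) % 100 := by omega
  simp only [pvStepA, h]
  split_ifs <;> simp

lemma pvFoldA_shift (l : List Char) : ∀ (i : Nat) (s : String),
    l.foldl pvStepA (i + 100, s) = ((l.foldl pvStepA (i, s)).1 + 100, (l.foldl pvStepA (i, s)).2) := by
  induction l with
  | nil => intro i s; simp
  | cons c t ih =>
    intro i s
    simp only [List.foldl_cons, pvStepA_shift]
    exact ih (pvStepA (i, s) c).1 (pvStepA (i, s) c).2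

lemma pvFoldA_small (l : List Char) : ∀ (i : Nat) (s : String), i + l.length ≤ 100 →
    l.foldl pvStepA (i, s)
      = (i + l.length, s ++ String.ofList l ++ (if l ≠ [] ∧ i + l.length = 100 then "\"+\r\n\"" else "")) := by
  induction l with
  | nil => intro i s _; simp
  | cons c t ih =>
    intro i s hle
    have hmk : String.ofList (c :: t) = String.ofList [c] ++ String.ofList t := by
      rw [← String.ofList_append, List.singleton_append]
    simp only [List.foldl_cons]
    by_cases h100 : i + 1 = 100
    · have ht : t = [] := by
        have : t.length = 0 := by simp at hle; omega
        exact List.eq_nil_of_length_eq_zero this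
      subst ht
      have hstep : pvStepA (i, s) c = (i + 1, s ++ String.ofList [c] ++ "\"+\r\n\"") := by
        simp only [pvStepA]
        rw [if_pos (by omega : (i + 1) % 100 = 0)]
      rw [hstep]
      simp only [List.foldl_nil, List.length_cons, List.length_nil]
      rw [if_pos ⟨by simp, by omega⟩, hmk]
    · have hlt : i + 1 < 100 := by simp at hle; omega
      have hmod : (i + 1) % 100 = i + 1 := Nat.mod_eq_of_lt hlt
      have hstep : pvStepA (i, s) c = (i + 1, s ++ String.ofList [c]) := by
        simp only [pvStepA, hmod]
        rw [if_neg (by omega : ¬ (i + 1 = 0))]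
      rw [hstep, ih (i + 1) (s ++ String.ofList [c]) (by simp at hle ⊢; omega)]
      have hfst : i + 1 + t.length = i + (c :: t).length := by simp; omega
      rw [hfst]
      split_ifs with hA hB hB
      · rw [hmk]; simp [String.append_assoc]
      · exact absurd ⟨by simp, hA.2⟩ hB
      · by_cases ht : t = []
        · subst ht; simp at hB; omega
        · exact absurd ⟨ht, hB.2⟩ hA
      · rw [hmk]; simp [String.append_assoc]

lemma pvFoldA_render (n : Nat) : ∀ (l : List Char) (s : String), l.length ≤ n →
    (l.foldl pvStepA (0, s)).2 = s ++ pvRender l := by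
  induction n with
  | zero =>
    intro l s hle
    have : l = [] := List.eq_nil_of_length_eq_zero (by omega)
    subst this
    rw [pvRender_eq]; simp
  | succ n ih =>
    intro l s hle
    have hR0 : pvRender [] = "" := by rw [pvRender_eq]; simp
    by_cases hsmall : l.length ≤ 100
    · rw [pvFoldA_small l 0 s (by omega)]
      dsimp only
      by_cases hnil : l = []
      · subst hnil; rw [hR0]; simp
      · have htake : l.take 100 = l := List.take_of_length_le hsmall
        have hdrop : l.drop 100 = [] := List.drop_eq_nil_of_le hsmall
        have hiff : (l ≠ [] ∧ 0 + l.length = 100) ↔ (100 ≤ l.length) := by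
          constructor
          · rintro ⟨_, h⟩; omega
          · intro h; exact ⟨hnil, by omega⟩
        rw [pvRender_eq, if_neg hnil, htake, hdrop, hR0]
        split_ifs with hA hB hB
        · simp [String.append_assoc]
        · exact absurd (hiff.mp hA) hB
        · exact absurd (hiff.mpr hB) hA
        · simp
    · have hsplit : l = l.take 100 ++ l.drop 100 := (List.take_append_drop 100 l).symm
      have hlen : (l.take 100).length = 100 := by simp; omega
      have hnil : l.take 100 ≠ [] := by
        intro h; rw [h] at hlen; simp at hlen
      conv_lhs => rw [hsplit]
      rw [List.foldl_append,
          pvFoldA_small (l.take 100) 0 s (by simp [hlen]),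
          hlen, if_pos ⟨hnil, by omega⟩]
      have hsh := pvFoldA_shift (l.drop 100) 0 (s ++ String.ofList (l.take 100) ++ "\"+\r\n\"")
      simp only [Nat.zero_add] at hsh ⊢
      rw [hsh]
      dsimp only
      rw [ih (l.drop 100) _ (by simp; omega)]
      conv_rhs => rw [pvRender_eq]
      have hln : l ≠ [] := by intro h; rw [h] at hsmall; simp at hsmall
      rw [if_neg hln, if_pos (by omega : 100 ≤ l.length)]
      simp [String.append_assoc]

lemma pvChunksB_render : ∀ (l : List Char) (i : Nat), pvChunksB l i = pvRender (l.drop i)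
  | l, i => by
    rw [pvChunksB]
    by_cases h : i < l.length
    · rw [dif_pos h]
      rw [pvChunksB_render l (i + 100)]
      have hsl : PySem.List.slice l (some (i : Int)) (some ((i : Int) + 100))
          = (l.drop i).take 100 := by
        rw [show ((100 : Int)) = ((100 : Nat) : Int) by norm_num,
            PySem.List.slice_natCast_add]
      have hdn : l.drop i ≠ [] := by
        intro hc
        have := congrArg List.length hc
        simp at this; omega
      conv_rhs => rw [pvRender_eq]
      rw [if_neg hdn]
      have hdd : (l.drop i).drop 100 = l.drop (i + 100) := by
        rw [List.drop_drop]
      have hcond : (i + 100 ≤ l.length) ↔ (100 ≤ (l.drop i).length) := by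
        simp; omega
      rw [hsl, hdd]
      split_ifs with hA hB hB
      · rfl
      · exact absurd (hcond.mp hA) hB
      · exact absurd (hcond.mpr hB) hA
      · rfl
    · rw [dif_neg h]
      have hd : l.drop i = [] := List.drop_eq_nil_of_le (by omega)
      rw [hd, pvRender_eq]; simp
termination_by l i => l.length - i
decreasing_by omega

-- ===== VERDICT (by name: the statement is the Claim_ definition above) =====
theorem shellcode_b64_py_spec : Claim_equal_shellcode_b64_py := by
  intro text _
  unfold Spec_shellcode_b64_py shellcode_b64_py shellcode_b64_py_alt
  rw [pvChunksB_render, List.drop_zero,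
      pvFoldA_render text.toList.length text.toList "\"" le_rfl]
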